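-- pv_equiv track=rewrite | github.com/micheloosterhof/aldegonde | experiments/custom_autokey_analysis.py | quagmire3_autokey_decrypt
-- ===== SOURCE A (Python) =====
-- def mixed_alphabet(keyword: str, alphabet: str) -> str:
--     """Create a mixed alphabet from a keyword."""
--     seen = set()
--     result = []
--     for c in keyword.upper():
--         if c in alphabet and c not in seen:
--             result.append(c)
--             seen.add(c)
--     for c in alphabet:
--         if c not in seen:
--             result.append(c)
--             seen.add(c)
--     return "".join(result)
--
-- def quagmire3_autokey_decrypt(
--     ciphertext: str,
--     keyword: str,
--     primer: str,
--     alphabet: str = "ABCDEFGHIJKLMNOPQRSTUVWXYZ",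
-- ) -> str:
--     """
--     Quagmire III ciphertext autokey decryption.
--
--     Beaufort is self-reciprocal: P = K - C
--     """
--     mixed = mixed_alphabet(keyword, alphabet)
--     n = len(alphabet)
--
--     char_to_pos = {c: i for i, c in enumerate(mixed)}
--     pos_to_char = {i: c for i, c in enumerate(mixed)}
--
--     plaintext = []
--     key_char = primer
--
--     for c in ciphertext.upper():
--         if c not in char_to_pos:
--             continue
--         c_pos = char_to_pos[c]
--         k_pos = char_to_pos[key_char]
--         # Beaufort decrypt: P = K - C
--         p_pos = (k_pos - c_pos) % n
--         p = pos_to_char[p_pos]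
--         plaintext.append(p)
--         key_char = c  # Ciphertext autokey
--
--     return "".join(plaintext)
-- ===== SOURCE B (Python) =====
-- def mixed_alphabet(keyword: str, alphabet: str) -> str:
--     """Create a mixed alphabet from a keyword."""
--     seen = set()
--     result = []
--     for c in keyword.upper():
--         if c in alphabet and c not in seen:
--             result.append(c)
--             seen.add(c)
--     for c in alphabet:
--         if c not in seen:
--             result.append(c)
--             seen.add(c)
--     return "".join(result)
--
--
-- def quagmire3_autokey_decrypt(
--     ciphertext: str,
--     keyword: str,
--     primer: str,
--     alphabet: str = "ABCDEFGHIJKLMNOPQRSTUVWXYZ",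
-- ) -> str:
--     """Quagmire III ciphertext autokey decryption via a precomputed table.
--
--     Beaufort decryption P = K - C depends only on the pair (key char, cipher
--     char), and in ciphertext autokey the key char of each position is just the
--     previous ciphertext char.  So build the full pairwise decryption table
--     dec[(k, c)] once over the mixed alphabet, and read the plaintext off the
--     consecutive pairs of the (filtered) ciphertext, headed by the primer pair.
--     """
--     mixed = mixed_alphabet(keyword, alphabet)
--     n = len(mixed)
--     dec = {}
--     for i, k in enumerate(mixed):
--         for j, c in enumerate(mixed):
--             dec[(k, c)] = mixed[(i - j) % n]
--     valid = [c for c in ciphertext.upper() if c in mixed]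
--     if not valid:
--         return ""
--     return dec[(primer, valid[0])] + "".join(dec[pair] for pair in zip(valid, valid[1:]))
-- ===== Notes on version B (the rewrite author's own statement) =====
-- stated objective: alternative
-- what changed: Replaces A's position dictionaries plus a running autokey state by a precomputed pairwise Beaufort decryption table dec[(key char, cipher char)] over the mixed alphabet; the plaintext is then read off the consecutive pairs of the filtered ciphertext (headed by the primer pair), with no index arithmetic or key state in the decryption pass.
-- outside the precondition, e.g. on quagmire3_autokey_decrypt('C', '', 'A', 'ABCC'): A returns 'C', B returns 'B'
import Mathlib
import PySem

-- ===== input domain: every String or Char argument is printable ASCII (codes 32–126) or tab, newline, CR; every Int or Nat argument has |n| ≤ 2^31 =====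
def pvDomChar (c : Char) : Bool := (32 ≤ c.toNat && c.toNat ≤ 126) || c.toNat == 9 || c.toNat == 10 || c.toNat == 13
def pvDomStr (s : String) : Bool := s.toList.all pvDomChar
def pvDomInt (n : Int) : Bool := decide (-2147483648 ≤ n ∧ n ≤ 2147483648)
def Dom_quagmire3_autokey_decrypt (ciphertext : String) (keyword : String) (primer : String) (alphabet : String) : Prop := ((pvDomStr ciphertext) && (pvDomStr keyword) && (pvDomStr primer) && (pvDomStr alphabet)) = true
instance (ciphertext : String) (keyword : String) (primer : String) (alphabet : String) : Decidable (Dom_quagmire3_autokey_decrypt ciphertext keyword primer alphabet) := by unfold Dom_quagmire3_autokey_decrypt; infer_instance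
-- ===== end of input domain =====

-- B replaces A's position dictionaries + running autokey state by a precomputed pairwise
-- decryption table read off consecutive ciphertext pairs (alternative decomposition, same result).

set_option maxHeartbeats 1000000

-- ===== PORT A =====
-- shared module helper mixed_alphabet (Source A and Source B contain it verbatim).
-- 'c in alphabet' for a single character c is exactly list membership in alphabet's characters.
def pvMixedAlphabet (keyword : String) (alphabet : String) : List Char :=
  let st1 := (PySem.Chars.upper keyword.toList).foldl
    (fun (st : PySem.Set Char × List Char) c =>
      if c ∈ alphabet.toList ∧ ¬ c ∈ st.1 then (PySem.Set.add st.1 c, st.2 ++ [c]) else st)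
    (PySem.Set.empty, [])
  let st2 := alphabet.toList.foldl
    (fun (st : PySem.Set Char × List Char) c =>
      if ¬ c ∈ st.1 then (PySem.Set.add st.1 c, st.2 ++ [c]) else st)
    st1
  st2.2

-- char_to_pos = {c: i for i, c in enumerate(mixed)}  (keys are 1-char strings, as in Python)
def pvCharToPos (mixed : List Char) : PySem.Dict String Int :=
  (PySem.List.enumerate mixed).foldl
    (fun d p => d.insert (String.mk [p.2]) p.1) PySem.Dict.empty

-- pos_to_char = {i: c for i, c in enumerate(mixed)}
def pvPosToChar (mixed : List Char) : PySem.Dict Int Char :=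
  (PySem.List.enumerate mixed).foldl
    (fun d p => d.insert p.1 p.2) PySem.Dict.empty

-- the per-character Beaufort step K - C; the getD defaults are reached only on
-- inputs excluded by Pre_ (in Python those lookups raise KeyError there)
def pvStepChar (ctp : PySem.Dict String Int) (ptc : PySem.Dict Int Char) (n : Int)
    (k : String) (c : Char) : Char :=
  ptc.getD (PySem.Int.mod (ctp.getD k 0 - ctp.getD (String.mk [c]) 0) n) ' '

def quagmire3_autokey_decrypt (ciphertext : String) (keyword : String) (primer : String) (alphabet : String) : String :=
  let mixed := pvMixedAlphabet keyword alphabet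
  let n : Int := (alphabet.toList.length : Int)
  let charToPos := pvCharToPos mixed
  let posToChar := pvPosToChar mixed
  let res := (PySem.Chars.upper ciphertext.toList).foldl
    (fun (st : List Char × String) c =>
      if charToPos.contains (String.mk [c]) then
        (st.1 ++ [pvStepChar charToPos posToChar n st.2 c], String.mk [c])
      else st)
    ([], primer)
  String.mk res.1

-- ===== PORT B =====
-- dec[(k, c)] = mixed[(i - j) % n] over all pairs of enumerate(mixed); the keys' second
-- component is always a single character of mixed, so it is carried as a Char.
-- mixed[(i - j) % n] is ported as pyGet? + getD ' ': inside the loops 0 ≤ (i-j) % n < n =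
-- len(mixed), so the index is always in range and the default is never used (exact).
def pvDecTable (m : List Char) : PySem.Dict (String × Char) Char :=
  let n : Int := (m.length : Int)
  (PySem.List.enumerate m).foldl (fun d ik =>
    (PySem.List.enumerate m).foldl (fun d jc =>
      d.insert (String.mk [ik.2], jc.2)
        ((PySem.List.pyGet? m (PySem.Int.mod (ik.1 - jc.1) n)).getD ' ')) d)
    PySem.Dict.empty

-- the getD defaults on the dec lookups are reached only on inputs excluded by Pre_
-- (in Python those lookups raise KeyError there)
def quagmire3_autokey_decrypt_alt (ciphertext : String) (keyword : String) (primer : String) (alphabet : String) : String :=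
  let mixed := pvMixedAlphabet keyword alphabet
  let dec := pvDecTable mixed
  let valid := (PySem.Chars.upper ciphertext.toList).filter (fun c => c ∈ mixed)
  match valid with
  | [] => ""
  | v0 :: rest =>
    String.mk (dec.getD (primer, v0) ' ' ::
      (((v0 :: rest).zip rest).map (fun pq => dec.getD (String.mk [pq.1], pq.2) ' ')))

-- ===== PRECONDITION & SPEC =====
-- Pre_: either the ciphertext contains no alphabet character (both programs produce "").
-- Otherwise it requires a primer that is a single alphabet character (else the first key
-- lookup raises KeyError) and a duplicate-free alphabet: with duplicates A's modulus
-- len(alphabet) exceeds the mixed-alphabet size, so A's pos_to_char lookup can raise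
-- KeyError mid-string, and where A happens to return anyway its value is an accident of
-- which residues stay below the mixed size.
def Pre_quagmire3_autokey_decrypt (ciphertext : String) (keyword : String) (primer : String) (alphabet : String) : Prop :=
  (PySem.Chars.upper ciphertext.toList).filter (fun c => c ∈ alphabet.toList) = [] ∨
  (alphabet.toList.Nodup ∧ primer.toList ∈ alphabet.toList.map (fun p => [p]))
instance (ciphertext : String) (keyword : String) (primer : String) (alphabet : String) : Decidable (Pre_quagmire3_autokey_decrypt ciphertext keyword primer alphabet) := by unfold Pre_quagmire3_autokey_decrypt; infer_instance

def pvWitness_quagmire3_autokey_decrypt : String × String × String × String :=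
  ("B", "C", "A", "ABC")

def Spec_quagmire3_autokey_decrypt (ciphertext : String) (keyword : String) (primer : String) (alphabet : String) (out : String) : Prop := out = quagmire3_autokey_decrypt_alt ciphertext keyword primer alphabet
instance (ciphertext : String) (keyword : String) (primer : String) (alphabet : String) (out : String) : Decidable (Spec_quagmire3_autokey_decrypt ciphertext keyword primer alphabet out) := by unfold Spec_quagmire3_autokey_decrypt; infer_instance

-- ===== CLAIM (what is proved, stated in full; the proofs are below) =====
def Claim_equal_quagmire3_autokey_decrypt : Prop := ∀ (ciphertext : String) (keyword : String) (primer : String) (alphabet : String), Dom_quagmire3_autokey_decrypt ciphertext keyword primer alphabet → Pre_quagmire3_autokey_decrypt ciphertext keyword primer alphabet → Spec_quagmire3_autokey_decrypt ciphertext keyword primer alphabet (quagmire3_autokey_decrypt ciphertext keyword primer alphabet)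

-- ===== LEMMAS AND PROOFS =====

-- ---- mixed alphabet: it is exactly set-dedup of (filtered upper keyword ++ alphabet) ----

lemma pv_loop1_pair (al : List Char) : ∀ (l : List Char) (s : PySem.Set Char),
    l.foldl (fun (st : PySem.Set Char × List Char) c =>
        if c ∈ al ∧ ¬ c ∈ st.1 then (PySem.Set.add st.1 c, st.2 ++ [c]) else st) (s, s)
    = ((l.filter (fun c => c ∈ al)).foldl PySem.Set.add s,
       (l.filter (fun c => c ∈ al)).foldl PySem.Set.add s) := by
  intro l
  induction l with
  | nil => intro s; simp
  | cons c t ih =>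
    intro s
    by_cases hal : c ∈ al
    · by_cases hs : c ∈ s
      · have hadd : PySem.Set.add s c = s := by
          simp [PySem.Set.add, PySem.Set.contains, hs]
        simp [hal, hs, hadd, ih]
      · have hadd : PySem.Set.add s c = s ++ [c] := by
          simp [PySem.Set.add, PySem.Set.contains, hs]
        simp only [List.foldl_cons, List.filter_cons]
        rw [if_pos ⟨hal, hs⟩, if_pos (by simpa using hal)]
        rw [hadd, ih (s ++ [c])]
        simp [hadd]
    · simp [hal, ih]

lemma pv_loop2_pair : ∀ (l : List Char) (s : PySem.Set Char),
    l.foldl (fun (st : PySem.Set Char × List Char) c =>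
        if ¬ c ∈ st.1 then (PySem.Set.add st.1 c, st.2 ++ [c]) else st) (s, s)
    = (l.foldl PySem.Set.add s, l.foldl PySem.Set.add s) := by
  intro l
  induction l with
  | nil => intro s; simp
  | cons c t ih =>
    intro s
    by_cases hs : c ∈ s
    · have hadd : PySem.Set.add s c = s := by
        simp [PySem.Set.add, PySem.Set.contains, hs]
      simp only [List.foldl_cons]
      rw [if_neg (not_not_intro hs), ih s, hadd]
    · have hadd : PySem.Set.add s c = s ++ [c] := by
        simp [PySem.Set.add, PySem.Set.contains, hs]
      simp only [List.foldl_cons]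
      rw [if_pos hs, hadd, ih (s ++ [c])]

lemma pv_mixed_eq (keyword alphabet : String) :
    pvMixedAlphabet keyword alphabet =
      PySem.Set.ofList ((PySem.Chars.upper keyword.toList).filter (fun c => c ∈ alphabet.toList)
        ++ alphabet.toList) := by
  unfold pvMixedAlphabet
  dsimp only
  rw [show (PySem.Set.empty : PySem.Set Char) = ([] : PySem.Set Char) from rfl]
  rw [pv_loop1_pair, pv_loop2_pair]
  rw [PySem.Set.ofList_eq_foldl, List.foldl_append]

lemma pv_mixed_nodup (keyword alphabet : String) : (pvMixedAlphabet keyword alphabet).Nodup := by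
  rw [pv_mixed_eq]; exact PySem.Set.nodup_ofList _

lemma pv_mixed_mem (keyword alphabet : String) (x : Char) :
    x ∈ pvMixedAlphabet keyword alphabet ↔ x ∈ alphabet.toList := by
  rw [pv_mixed_eq, PySem.Set.mem_ofList, List.mem_append]
  constructor
  · rintro (h | h)
    · exact of_decide_eq_true (List.mem_filter.mp h).2
    · exact h
  · exact Or.inr

lemma pv_mixed_length (keyword alphabet : String) (h : alphabet.toList.Nodup) :
    (pvMixedAlphabet keyword alphabet).length = alphabet.toList.length := by
  have hperm : (pvMixedAlphabet keyword alphabet).Perm alphabet.toList := by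
    apply List.perm_of_nodup_nodup_toFinset_eq (pv_mixed_nodup _ _) h
    ext x
    simp [List.mem_toFinset, pv_mixed_mem]
  exact hperm.length_eq

-- ---- generic lookup of a fold of inserts (value depends only on the element) ----

lemma pv_get?_foldl_insert_of_none {α κ ν : Type} [BEq κ] [LawfulBEq κ]
    (k : α → κ) (v : α → ν) (K : κ) :
    ∀ (l : List α) (d : PySem.Dict κ ν), (∀ a ∈ l, (k a == K) = false) →
      (l.foldl (fun d a => d.insert (k a) (v a)) d).get? K = d.get? K := by
  intro l
  induction l with
  | nil => intro d _; rfl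
  | cons a t ih =>
    intro d h
    simp only [List.foldl_cons]
    rw [ih _ (fun b hb => h b (List.mem_cons_of_mem _ hb))]
    have hne : K ≠ k a := by
      intro he; have := h a (List.mem_cons_self); simp [he] at this
    exact PySem.Dict.get?_insert_of_ne d (v a) hne

lemma pv_get?_foldl_insert_of_filter_singleton {α κ ν : Type} [BEq κ] [LawfulBEq κ]
    (k : α → κ) (v : α → ν) (K : κ) (a0 : α) :
    ∀ (l : List α) (d : PySem.Dict κ ν), l.filter (fun a => k a == K) = [a0] →
      (l.foldl (fun d a => d.insert (k a) (v a)) d).get? K = some (v a0) := by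
  intro l
  induction l with
  | nil => intro d h; simp at h
  | cons a t ih =>
    intro d h
    by_cases ha : (k a == K) = true
    · rw [List.filter_cons, if_pos ha] at h
      obtain ⟨rfl, ht⟩ : a = a0 ∧ t.filter (fun a => k a == K) = [] := by
        constructor <;> [exact (List.cons_eq_cons.mp h).1; exact (List.cons_eq_cons.mp h).2]
      simp only [List.foldl_cons]
      rw [pv_get?_foldl_insert_of_none k v K t _ ?_]
      · have : K = k a := (eq_of_beq ha).symm
        rw [this]; exact PySem.Dict.get?_insert_self _ _ _
      · intro b hb
        have := List.filter_eq_nil_iff.mp ht b hb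
        simpa using this
    · rw [List.filter_cons_of_neg (by simpa using ha)] at h
      simp only [List.foldl_cons]
      exact ih _ h

-- ---- the enumerate filters picked out by the three dictionaries ----

lemma pv_enum_filter_snd (c : Char) : ∀ (m : List Char) (s : Int), m.Nodup → c ∈ m →
    (PySem.List.enumerate m s).filter (fun p => p.2 == c)
      = [(s + (m.idxOf c : Int), c)] := by
  intro m
  induction m with
  | nil => intro s _ hc; simp at hc
  | cons x t ih =>
    intro s hnd hc
    rw [PySem.List.enumerate_cons]
    by_cases hx : x = c
    · subst hx
      rw [List.filter_cons_of_pos (by simp)]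
      have ht : (PySem.List.enumerate t (s+1)).filter (fun p => p.2 == x) = [] := by
        apply List.filter_eq_nil_iff.mpr
        intro p hp
        obtain ⟨j, hj, rfl⟩ := (PySem.List.mem_enumerate_iff _ _ _).mp hp
        have : t[j] ≠ x := fun he => (List.nodup_cons.mp hnd).1 (he ▸ List.getElem_mem hj)
        simpa using this
      rw [ht, List.idxOf_cons_self]
      simp
    · rw [List.filter_cons_of_neg (by simpa using fun h => hx h)]
      rw [ih (s+1) (List.nodup_cons.mp hnd).2 (by rcases List.mem_cons.mp hc with h|h; exact absurd h.symm hx; exact h)]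
      rw [List.idxOf_cons_ne _ hx]
      congr 1
      push_cast
      ring_nf

lemma pv_enum_filter_fst : ∀ (m : List Char) (s : Int) (j : Nat) (hj : j < m.length),
    (PySem.List.enumerate m s).filter (fun p => p.1 == s + (j : Int)) = [(s + (j : Int), m[j])] := by
  intro m
  induction m with
  | nil => intro s j hj; simp at hj
  | cons x t ih =>
    intro s j hj
    rw [PySem.List.enumerate_cons]
    cases j with
    | zero =>
      rw [List.filter_cons_of_pos (by simp)]
      have ht : (PySem.List.enumerate t (s+1)).filter (fun p => p.1 == s + ((0:Nat) : Int)) = [] := by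
        apply List.filter_eq_nil_iff.mpr
        intro p hp
        obtain ⟨k, hk, rfl⟩ := (PySem.List.mem_enumerate_iff _ _ _).mp hp
        simp only [beq_iff_eq, decide_eq_true_eq]
        push_cast
        omega
      rw [ht]
      simp
    | succ j' =>
      rw [List.filter_cons_of_neg (by simp only [beq_iff_eq, decide_eq_true_eq]; push_cast; omega)]
      have : s + ((j'+1 : Nat) : Int) = (s+1) + (j' : Int) := by push_cast; ring
      rw [this, ih (s+1) j' (by simpa using hj)]
      simp

lemma pv_mk_single_eq_iff (a c : Char) : (String.mk [a] = String.mk [c]) ↔ a = c := by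
  rw [show (String.mk [a]) = String.ofList [a] from rfl,
      show (String.mk [c]) = String.ofList [c] from rfl, String.ofList_inj]
  simp

lemma pv_beq_eq_decide {γ : Type} [DecidableEq γ] [BEq γ] [LawfulBEq γ] (x y : γ) :
    (x == y) = decide (x = y) := by
  by_cases h : x = y <;> simp [h]

lemma pv_ctp_get? (m : List Char) (c : Char) (hm : m.Nodup) (hc : c ∈ m) :
    (pvCharToPos m).get? (String.mk [c]) = some ((m.idxOf c : Int)) := by
  unfold pvCharToPos
  have hfil : (PySem.List.enumerate m 0).filter
      (fun p => ((String.mk [p.2] : String) == String.mk [c])) = [(((m.idxOf c : Nat) : Int), c)] := by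
    rw [List.filter_congr (fun p _ => ?_)]
    · simpa using pv_enum_filter_snd c m 0 hm hc
    · show ((String.mk [p.2] : String) == String.mk [c]) = (p.2 == c)
      rw [pv_beq_eq_decide, pv_beq_eq_decide]
      exact decide_eq_decide.mpr (pv_mk_single_eq_iff _ _)
  exact pv_get?_foldl_insert_of_filter_singleton (fun (p : Int × Char) => String.mk [p.2]) (fun (p : Int × Char) => p.1)
    (String.mk [c]) (((m.idxOf c : Int)), c) _ _ hfil

lemma pv_ptc_getD (m : List Char) (j : Nat) (hj : j < m.length) :
    (pvPosToChar m).getD ((j : Int)) ' ' = m[j] := by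
  unfold pvPosToChar
  rw [PySem.Dict.getD_eq_get?_getD]
  have hfil : (PySem.List.enumerate m 0).filter (fun p => (p.1 == ((j : Nat) : Int)))
      = [(((j : Nat) : Int), m[j])] := by
    simpa using pv_enum_filter_fst m 0 j hj
  rw [pv_get?_foldl_insert_of_filter_singleton (fun p => p.1) (fun p => p.2)
    ((j : Int)) (((j : Int)), m[j]) _ _ hfil]
  rfl

lemma pv_get?_foldl_insert_isSome {α κ ν : Type} [BEq κ] [LawfulBEq κ]
    (k : α → κ) (v : α → ν) (K : κ) :
    ∀ (l : List α) (d : PySem.Dict κ ν), (∃ a ∈ l, k a = K) →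
      ((l.foldl (fun d a => d.insert (k a) (v a)) d).get? K).isSome = true := by
  intro l
  induction l with
  | nil => rintro d ⟨a, ha, _⟩; cases ha
  | cons a t ih =>
    intro d hex
    by_cases h : ∀ b ∈ t, (k b == K) = false
    · have hka : k a = K := by
        obtain ⟨b, hb, hk⟩ := hex
        rcases List.mem_cons.mp hb with rfl | hbt
        · exact hk
        · exact absurd (beq_iff_eq.mpr hk) (by simp [h b hbt])
      simp only [List.foldl_cons]
      rw [pv_get?_foldl_insert_of_none k v K t _ h, hka, PySem.Dict.get?_insert_self]
      rfl
    · push_neg at h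
      obtain ⟨b, hbt, hb⟩ := h
      simp only [List.foldl_cons]
      exact ih _ ⟨b, hbt, by simpa using hb⟩

lemma pv_ctp_contains (m : List Char) (c : Char) :
    (pvCharToPos m).contains (String.mk [c]) = decide (c ∈ m) := by
  unfold pvCharToPos
  rw [PySem.Dict.contains_eq_isSome_get?]
  by_cases h : c ∈ m
  · obtain ⟨p, hp, hpc⟩ : ∃ p ∈ PySem.List.enumerate m 0, p.2 = c := by
      have := (PySem.List.map_snd_enumerate m 0) ▸ h
      obtain ⟨p, hp, hpc⟩ := List.mem_map.mp this
      exact ⟨p, hp, hpc⟩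
    rw [pv_get?_foldl_insert_isSome (fun (p : Int × Char) => String.mk [p.2]) (fun (p : Int × Char) => p.1)
        (String.mk [c]) _ _ ⟨p, hp, by show String.mk [p.2] = String.mk [c]; rw [hpc]⟩]
    simp [h]
  · rw [pv_get?_foldl_insert_of_none (fun (p : Int × Char) => String.mk [p.2]) (fun (p : Int × Char) => p.1) (String.mk [c]) _ _ ?_]
    · simp [h, PySem.Dict.get?_empty]
    · intro p hp
      have hpm : p.2 ∈ m := by
        have := PySem.List.map_snd_enumerate m 0
        exact this ▸ List.mem_map_of_mem hp
      rw [pv_beq_eq_decide]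
      simp only [decide_eq_false_iff_not]
      intro he
      exact h ((pv_mk_single_eq_iff p.2 c).mp he ▸ hpm)

-- ---- the pairwise table ----

lemma pv_flatMap_eq_of_filter_singleton {α β : Type} (p : α → Bool) (g : α → List β) (a0 : α) :
    ∀ (l : List α), (∀ a ∈ l, p a = false → g a = []) → l.filter p = [a0] →
      l.flatMap g = g a0 := by
  intro l
  induction l with
  | nil => intro _ h; simp at h
  | cons a t ih =>
    intro hg h
    by_cases ha : p a = true
    · rw [List.filter_cons, if_pos ha] at h
      obtain ⟨rfl, ht⟩ := List.cons_eq_cons.mp h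
      have htnil : t.flatMap g = [] := by
        rw [List.flatMap_eq_nil_iff]
        intro b hb
        exact hg b (List.mem_cons_of_mem _ hb)
          (by have := List.filter_eq_nil_iff.mp ht b hb; simpa using this)
      rw [List.flatMap_cons, htnil, List.append_nil]
    · have hpa : p a = false := by simpa using ha
      rw [List.filter_cons, if_neg (by simp [hpa])] at h
      rw [List.flatMap_cons, hg a List.mem_cons_self hpa, List.nil_append]
      exact ih (fun b hb => hg b (List.mem_cons_of_mem _ hb)) h

lemma pv_dec_get? (m : List Char) (k c : Char) (hm : m.Nodup) (hk : k ∈ m) (hc : c ∈ m) :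
    (pvDecTable m).get? (String.mk [k], c)
      = some ((PySem.List.pyGet? m
          (PySem.Int.mod ((m.idxOf k : Int) - (m.idxOf c : Int)) (m.length : Int))).getD ' ') := by
  have hflat : pvDecTable m
      = ((PySem.List.enumerate m 0).flatMap
          (fun ik => (PySem.List.enumerate m 0).map (fun jc => (ik, jc)))).foldl
          (fun d pq => d.insert (String.mk [pq.1.2], pq.2.2)
            ((PySem.List.pyGet? m (PySem.Int.mod (pq.1.1 - pq.2.1) (m.length : Int))).getD ' '))
          PySem.Dict.empty := by
    unfold pvDecTable
    dsimp only
    rw [List.foldl_flatMap]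
    simp only [List.foldl_map]
  rw [hflat]
  apply pv_get?_foldl_insert_of_filter_singleton
    (fun (pq : (Int × Char) × (Int × Char)) => ((String.mk [pq.1.2], pq.2.2) : String × Char))
    (fun (pq : (Int × Char) × (Int × Char)) =>
      ((PySem.List.pyGet? m (PySem.Int.mod (pq.1.1 - pq.2.1) (m.length : Int))).getD ' '))
    ((String.mk [k], c)) ((((m.idxOf k : Int), k), ((m.idxOf c : Int), c)))
  have hpred : ∀ (ik jc : Int × Char),
      (((String.mk [ik.2], jc.2) : String × Char) == (String.mk [k], c)) = (ik.2 == k && jc.2 == c) := by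
    intro ik jc
    rw [pv_beq_eq_decide, pv_beq_eq_decide, pv_beq_eq_decide]
    rw [show (decide (ik.2 = k) && decide (jc.2 = c)) = decide (ik.2 = k ∧ jc.2 = c) by
      by_cases h1 : ik.2 = k <;> by_cases h2 : jc.2 = c <;> simp [h1, h2]]
    apply decide_eq_decide.mpr
    rw [Prod.ext_iff]
    simp [pv_mk_single_eq_iff]
  rw [List.filter_flatMap]
  have hg : ∀ ik ∈ PySem.List.enumerate m 0, ((fun (ik : Int × Char) => ik.2 == k) ik = false) →
      ((PySem.List.enumerate m 0).map (fun jc => (ik, jc))).filter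
        (fun pq => ((String.mk [pq.1.2], pq.2.2) : String × Char) == (String.mk [k], c)) = [] := by
    intro ik _ hik
    rw [List.filter_map, List.filter_eq_nil_iff.mpr, List.map_nil]
    intro jc _
    show ¬ ((((String.mk [ik.2], jc.2) : String × Char) == (String.mk [k], c)) = true)
    rw [hpred]
    simp only [hik, Bool.false_and]
    exact Bool.false_ne_true
  have hf : (PySem.List.enumerate m 0).filter (fun (ik : Int × Char) => ik.2 == k)
      = [((m.idxOf k : Int), k)] := by simpa using pv_enum_filter_snd k m 0 hm hk
  rw [pv_flatMap_eq_of_filter_singleton _ _ _ _ hg hf]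
  rw [List.filter_map]
  have hinner : (PySem.List.enumerate m 0).filter
      ((fun pq => (((String.mk [pq.1.2], pq.2.2) : String × Char) == (String.mk [k], c)))
        ∘ (fun jc => (((m.idxOf k : Int), k), jc))) = [((m.idxOf c : Int), c)] := by
    rw [List.filter_congr (fun jc _ => ?_)]
    · simpa using pv_enum_filter_snd c m 0 hm hc
    · show ((((String.mk [k], jc.2) : String × Char) == (String.mk [k], c))) = (jc.2 == c)
      rw [hpred ((m.idxOf k : Int), k) jc]
      simp
  rw [hinner, List.map_cons, List.map_nil]

-- ---- the pointwise step equality ----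

lemma pv_step_eq (m : List Char) (k c : Char) (hm : m.Nodup) (hk : k ∈ m) (hc : c ∈ m) :
    pvStepChar (pvCharToPos m) (pvPosToChar m) (m.length : Int) (String.mk [k]) c
      = (pvDecTable m).getD (String.mk [k], c) ' ' := by
  have hlen : 0 < (m.length : Int) := by exact_mod_cast List.length_pos_of_mem hk
  unfold pvStepChar
  rw [PySem.Dict.getD_eq_get?_getD (pvCharToPos m) (String.mk [k]) 0,
      PySem.Dict.getD_eq_get?_getD (pvCharToPos m) (String.mk [c]) 0,
      pv_ctp_get? m k hm hk, pv_ctp_get? m c hm hc]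
  simp only [Option.getD_some]
  rw [PySem.Dict.getD_eq_get?_getD (pvDecTable m) _ ' ', pv_dec_get? m k c hm hk hc,
      Option.getD_some]
  set r := PySem.Int.mod ((m.idxOf k : Int) - (m.idxOf c : Int)) (m.length : Int) with hr
  have hr0 : 0 ≤ r := PySem.Int.mod_nonneg _ hlen
  have hrlt : r < (m.length : Int) := PySem.Int.mod_lt _ hlen
  have hjr : r.toNat < m.length := by omega
  rw [PySem.List.pyGet?_eq_some_getElem m hr0 hrlt, Option.getD_some]
  have hp := pv_ptc_getD m r.toNat hjr
  rw [show ((r.toNat : Nat) : Int) = r from Int.toNat_of_nonneg hr0] at hp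
  exact hp

-- ---- A's state-threading loop = map over the shifted-key zip ----

lemma pv_loop_eq_zip (ctp : PySem.Dict String Int) (ptc : PySem.Dict Int Char) (n : Int) :
    ∀ (l : List Char) (k : String) (acc : List Char),
      (l.foldl
        (fun (st : List Char × String) c =>
          if ctp.contains (String.mk [c]) then
            (st.1 ++ [pvStepChar ctp ptc n st.2 c], String.mk [c])
          else st)
        (acc, k)).1
      = acc ++ (((k :: (l.filter (fun c => ctp.contains (String.mk [c]))).map
                    (fun c => String.mk [c])).zip
                 (l.filter (fun c => ctp.contains (String.mk [c])))).map
          (fun kc => pvStepChar ctp ptc n kc.1 kc.2)) := by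
  intro l
  induction l with
  | nil => intro k acc; simp
  | cons c l ih =>
    intro k acc
    by_cases h : ctp.contains (String.mk [c])
    · simp only [List.foldl_cons, List.filter_cons, h, if_pos, ite_true, List.map_cons,
        List.zip_cons_cons, List.map_cons]
      rw [ih (String.mk [c]) (acc ++ [pvStepChar ctp ptc n k c])]
      simp
    · simp only [List.foldl_cons, List.filter_cons, h, ite_false, Bool.false_eq_true,
        if_neg, not_false_iff]
      exact ih k acc

-- ===== VERDICT (by name: the statement is the Claim_ definition above) =====
theorem quagmire3_autokey_decrypt_spec : Claim_equal_quagmire3_autokey_decrypt := by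
  intro ct kw pr al _ hpre
  unfold Spec_quagmire3_autokey_decrypt quagmire3_autokey_decrypt quagmire3_autokey_decrypt_alt
  dsimp only
  rw [pv_loop_eq_zip]
  rw [List.nil_append]
  have hfeq : (PySem.Chars.upper ct.toList).filter
      (fun c => (pvCharToPos (pvMixedAlphabet kw al)).contains (String.mk [c]))
      = (PySem.Chars.upper ct.toList).filter (fun c => decide (c ∈ pvMixedAlphabet kw al)) :=
    List.filter_congr (fun c _ => pv_ctp_contains _ c)
  rw [hfeq]
  cases hv : (PySem.Chars.upper ct.toList).filter (fun c => decide (c ∈ pvMixedAlphabet kw al)) with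
  | nil =>
    simp only [List.map_nil, List.zip_nil_right, List.map_nil]
    exact String.toList_inj.mp (by simp [show String.mk ([] : List Char) = String.ofList [] from rfl])
  | cons v0 rest =>
    rcases hpre with hnil | ⟨hnd, hpr⟩
    · exfalso
      have hsame : (PySem.Chars.upper ct.toList).filter (fun c => decide (c ∈ pvMixedAlphabet kw al))
          = (PySem.Chars.upper ct.toList).filter (fun c => decide (c ∈ al.toList)) :=
        List.filter_congr (fun c _ => decide_eq_decide.mpr (pv_mixed_mem kw al c))
      have : (v0 :: rest : List Char) = [] := by rw [← hv, hsame, hnil]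
      exact List.cons_ne_nil _ _ this
    · obtain ⟨p, hpal, hple⟩ := List.mem_map.mp hpr
      have hprm : pr = String.mk [p] := by
        have h1 : String.ofList pr.toList = String.ofList [p] := by rw [← hple]
        rw [String.ofList_toList] at h1
        exact h1
      have hm : (pvMixedAlphabet kw al).Nodup := pv_mixed_nodup kw al
      have hlen : (al.toList.length : Int) = ((pvMixedAlphabet kw al).length : Int) := by
        rw [pv_mixed_length kw al hnd]
      have hmemv : ∀ x ∈ v0 :: rest, x ∈ pvMixedAlphabet kw al := by
        intro x hx
        have hx2 : x ∈ (PySem.Chars.upper ct.toList).filter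
            (fun c => decide (c ∈ pvMixedAlphabet kw al)) := hv ▸ hx
        exact of_decide_eq_true (List.mem_filter.mp hx2).2
      have hpm : p ∈ pvMixedAlphabet kw al := (pv_mixed_mem kw al p).mpr hpal
      rw [hprm, hlen]
      simp only [List.map_cons, List.zip_cons_cons, List.map_cons]
      refine congrArg String.mk (List.cons_eq_cons.mpr ⟨?_, ?_⟩)
      · exact pv_step_eq _ p v0 hm hpm (hmemv v0 List.mem_cons_self)
      · rw [show (String.mk [v0] :: List.map (fun c => String.mk [c]) rest)
              = List.map (fun c => String.mk [c]) (v0 :: rest) from rfl]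
        rw [List.zip_map_left, List.map_map]
        apply List.map_congr_left
        intro pq hpq
        obtain ⟨a, b⟩ := pq
        obtain ⟨h1, h2⟩ := List.of_mem_zip hpq
        exact pv_step_eq _ a b hm (hmemv a h1) (hmemv b (List.mem_cons_of_mem _ h2))
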